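-- pv_equiv track=rewrite | github.com/diwert-ai/Problems | Problems/HSE_DPO_DS/DPO_Algo_2023/contest 9/islands.py | process_bridges
-- ===== SOURCE A (Python) =====
-- def process_bridges(bridges, n):
--     parents = [i for i in range(n)]
--     size = [1 for _ in range(n)]
--
--     def find(a):
--         root = a
--         while parents[root] != root:
--             root = parents[root]
--
--         # таки делаем сжатие путей
--         while parents[a] != a:
--             next_element = parents[a]
--             parents[a] = root
--             a = next_element
--
--         return root
--
--     for i, (i1, i2) in enumerate(bridges, 1):
--         root_i1, root_i2 = find(i1), find(i2)
--         if root_i1 != root_i2: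
--             # делаем ранговую эвристику
--             if size[root_i1] > size[root_i2]:
--                 root_i1, root_i2 = root_i1, root_i2
--             parents[root_i1] = root_i2  # union(a, b)
--             size[root_i2] += size[root_i1]
--             n -= 1
--
--         if n == 1:
--             return i
--
--     return -1
-- ===== SOURCE B (Python) =====
-- def process_bridges(bridges, n):
--     labels = list(range(n))
--     components = n
--     for i, (a, b) in enumerate(bridges, 1):
--         la, lb = labels[a], labels[b]
--         if la != lb:
--             labels = [lb if l == la else l for l in labels]
--             components -= 1
--         if components == 1:
--             return i
--     return -1
-- ===== Notes on version B (the rewrite author's own statement) =====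
-- stated objective: alternative
-- what changed: Replaced the union-find forest (parent pointers, two pointer-chasing while loops with path compression, and a size array whose 'rank heuristic' swap is a no-op) by a flat component-label array: each union rewrites one label over the array in a single pass, so there is no find, no compression and no size bookkeeping; this trades A's near-linear amortized time for an O(n*m) worst case.
-- outside the precondition, e.g. on process_bridges([(0, 1), (5, 5)], 2): A returns 1, B returns 1
import Mathlib
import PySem

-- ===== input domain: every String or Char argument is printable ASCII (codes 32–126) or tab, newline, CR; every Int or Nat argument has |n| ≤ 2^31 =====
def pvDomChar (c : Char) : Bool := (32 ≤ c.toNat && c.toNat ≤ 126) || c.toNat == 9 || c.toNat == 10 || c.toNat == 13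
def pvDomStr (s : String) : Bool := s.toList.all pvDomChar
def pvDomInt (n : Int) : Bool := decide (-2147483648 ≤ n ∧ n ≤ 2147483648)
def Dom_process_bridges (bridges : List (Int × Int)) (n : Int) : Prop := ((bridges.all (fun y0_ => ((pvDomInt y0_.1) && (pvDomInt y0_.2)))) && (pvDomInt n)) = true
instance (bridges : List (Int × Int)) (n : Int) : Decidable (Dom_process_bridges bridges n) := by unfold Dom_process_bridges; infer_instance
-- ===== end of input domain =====

-- B replaces A's union-find forest (pointer-chasing find with path compression, size array) by a
-- flat component-label array rewritten in one pass per union: a plainer data structure, at the cost of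
-- an O(n*m) worst case versus A's near-linear amortized time.
-- A mutates nothing observable to the caller; equivalence is about the return value.


-- ===== PORT A =====
-- 'while parents[root] != root: root = parents[root]' — fuel-bounded; under Pre_ the forest is
-- acyclic and the fuel passed by process_bridges is proved sufficient. pyGet? none = IndexError
-- (excluded by Pre_); the loop state is returned unchanged there.
def pvFindRoot (parents : List Int) (fuel : Nat) (root : Int) : Int :=
  match fuel with
  | 0 => root
  | f + 1 =>
    match PySem.List.pyGet? parents root with
    | some p => if p ≠ root then pvFindRoot parents f p else root
    | none => root

-- the path-compression loop: 'while parents[a] != a: next = parents[a]; parents[a] = root; a = next'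
def pvCompress (parents : List Int) (fuel : Nat) (a : Int) (root : Int) : List Int :=
  match fuel with
  | 0 => parents
  | f + 1 =>
    match PySem.List.pyGet? parents a with
    | some p => if p ≠ a then pvCompress (PySem.List.pySetD parents a root) f p root else parents
    | none => parents

-- 'for i, (i1, i2) in enumerate(bridges, 1): ...'
def pvLoopA (bridges : List (Int × Int)) (i : Int) (parents size : List Int) (fuel : Nat) (n : Int) : Int :=
  match bridges with
  | [] => -1
  | (i1, i2) :: rest =>
    let r1 := pvFindRoot parents fuel i1
    let parents1 := pvCompress parents fuel i1 r1
    let r2 := pvFindRoot parents1 fuel i2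
    let parents2 := pvCompress parents1 fuel i2 r2
    let st :=
      if r1 ≠ r2 then
        -- Python's 'rank heuristic' line 'root_i1, root_i2 = root_i1, root_i2' is an identity swap
        let rr := if PySem.List.pyGetD size r1 0 > PySem.List.pyGetD size r2 0 then (r1, r2) else (r1, r2)
        (PySem.List.pySetD parents2 rr.1 rr.2,
         PySem.List.pySetD size rr.2 (PySem.List.pyGetD size rr.2 0 + PySem.List.pyGetD size rr.1 0),
         n - 1)
      else (parents2, size, n)
    if st.2.2 = 1 then i else pvLoopA rest (i + 1) st.1 st.2.1 fuel st.2.2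

def process_bridges (bridges : List (Int × Int)) (n : Int) : Int :=
  pvLoopA bridges 1 (PySem.List.pyRange 0 n 1) ((PySem.List.pyRange 0 n 1).map (fun _ => 1))
    (n.toNat + bridges.length + 2) n

-- ===== PORT B =====
def pvLoopB (bridges : List (Int × Int)) (i : Int) (labels : List Int) (components : Int) : Int :=
  match bridges with
  | [] => -1
  | (a, b) :: rest =>
    let la := PySem.List.pyGetD labels a 0
    let lb := PySem.List.pyGetD labels b 0
    let st :=
      if la ≠ lb then (labels.map (fun l => if l = la then lb else l), components - 1)
      else (labels, components)
    if st.2 = 1 then i else pvLoopB rest (i + 1) st.1 st.2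

def process_bridges_alt (bridges : List (Int × Int)) (n : Int) : Int :=
  pvLoopB bridges 1 (PySem.List.pyRange 0 n 1) n

-- ===== PRECONDITION & SPEC =====
-- Pre_ excludes exactly the inputs on which Python A can raise IndexError: a nonempty bridge list
-- with n < 1, or a bridge endpoint outside [-n, n).  (When connectivity is reached before the
-- offending bridge A returns normally; such inputs are still excluded — see the cite.)
def Pre_process_bridges (bridges : List (Int × Int)) (n : Int) : Prop :=
  bridges = [] ∨ (1 ≤ n ∧ ∀ p ∈ bridges, -n ≤ p.1 ∧ p.1 < n ∧ -n ≤ p.2 ∧ p.2 < n)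
instance (bridges : List (Int × Int)) (n : Int) : Decidable (Pre_process_bridges bridges n) := by
  unfold Pre_process_bridges; infer_instance

def pvWitness_process_bridges : (List (Int × Int)) × Int := ([(0, 1), (-1, 2)], 3)

def Spec_process_bridges (bridges : List (Int × Int)) (n : Int) (out : Int) : Prop := out = process_bridges_alt bridges n
instance (bridges : List (Int × Int)) (n : Int) (out : Int) : Decidable (Spec_process_bridges bridges n out) := by unfold Spec_process_bridges; infer_instance

-- ===== CLAIM (what is proved, stated in full; the proofs are below) =====
def Claim_equal_process_bridges : Prop := ∀ (bridges : List (Int × Int)) (n : Int), Dom_process_bridges bridges n → Pre_process_bridges bridges n → Spec_process_bridges bridges n (process_bridges bridges n)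

-- ===== LEMMAS AND PROOFS =====

-- normalized (Python wraparound) index for -N ≤ a < N
def pvNrm (N : Nat) (a : Int) : Nat := if a < 0 then (a + N).toNat else a.toNat

-- the parent function of a parents list, as Nat → Nat
def pvPf (parents : List Int) (j : Nat) : Nat := (parents.getD j 0).toNat

-- "from j, k iterations of f reach the fixpoint r"
def pvReach (f : Nat → Nat) (j r k : Nat) : Prop := f^[k] j = r ∧ f r = r

lemma pvNrm_lt (N : Nat) (a : Int) (h1 : -(N:Int) ≤ a) (h2 : a < (N:Int)) (_hN : 0 < N) :
    pvNrm N a < N := by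
  unfold pvNrm; split_ifs <;> omega

lemma pvNrm_natCast (N j : Nat) : pvNrm N ((j:Nat):Int) = j := by
  unfold pvNrm
  rw [if_neg (by omega)]
  simp

lemma pvIdx_eq (N : Nat) (a : Int) (h1 : -(N:Int) ≤ a) (h2 : a < (N:Int)) :
    PySem.List.pyIdx? N a = some (pvNrm N a) := by
  unfold PySem.List.pyIdx? pvNrm
  by_cases h0 : 0 ≤ a
  · rw [if_pos h0, if_pos h2, if_neg (by omega)]
  · rw [if_neg h0, if_pos h1, if_pos (by omega)]
    congr 1
    omega

lemma pv_get?_nrm (xs : List Int) (N : Nat) (hlen : xs.length = N) (a : Int)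
    (h1 : -(N:Int) ≤ a) (h2 : a < (N:Int)) :
    PySem.List.pyGet? xs a = some (xs.getD (pvNrm N a) 0) := by
  subst hlen
  have hN : 0 < xs.length := by omega
  have hlt : pvNrm xs.length a < xs.length := pvNrm_lt _ a h1 h2 hN
  unfold PySem.List.pyGet?
  rw [pvIdx_eq _ a h1 h2]
  show xs[pvNrm xs.length a]? = some (xs.getD (pvNrm xs.length a) 0)
  rw [List.getElem?_eq_getElem hlt, List.getD_eq_getElem _ _ hlt]

lemma pv_getD_nrm (xs : List Int) (N : Nat) (hlen : xs.length = N) (a : Int)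
    (h1 : -(N:Int) ≤ a) (h2 : a < (N:Int)) :
    PySem.List.pyGetD xs a 0 = xs.getD (pvNrm N a) 0 := by
  unfold PySem.List.pyGetD
  rw [pv_get?_nrm xs N hlen a h1 h2]
  rfl

lemma pv_setD_nrm (xs : List Int) (N : Nat) (hlen : xs.length = N) (a v : Int)
    (h1 : -(N:Int) ≤ a) (h2 : a < (N:Int)) :
    PySem.List.pySetD xs a v = xs.set (pvNrm N a) v := by
  subst hlen
  unfold PySem.List.pySetD PySem.List.pySet?
  rw [pvIdx_eq _ a h1 h2]
  rfl

lemma pv_getD_set (xs : List Int) (i j : Nat) (v : Int) (_hi : i < xs.length) :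
    (xs.set i v).getD j 0 = if j = i then v else xs.getD j 0 := by
  by_cases hj : j < xs.length
  · have hj' : j < (xs.set i v).length := by simpa using hj
    rw [List.getD_eq_getElem _ _ hj', List.getElem_set]
    by_cases h : i = j
    · rw [if_pos h, if_pos h.symm]
    · rw [if_neg h, if_neg (fun hh => h hh.symm), List.getD_eq_getElem _ _ hj]
  · have h1 : xs.length ≤ j := by omega
    rw [List.getD_eq_default _ _ (by simpa using h1), List.getD_eq_default _ _ h1,
      if_neg (by omega)]

lemma pv_getD_map (h : Int → Int) (xs : List Int) (j : Nat) (hj : j < xs.length) :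
    (xs.map h).getD j 0 = h (xs.getD j 0) := by
  rw [List.getD_eq_getElem _ _ (by simpa using hj), List.getElem_map,
    List.getD_eq_getElem _ _ hj]

lemma pvPf_lt (parents : List Int) (N : Nat) (hN : 0 < N) (hlen : parents.length = N)
    (hrange : ∀ j, j < N → 0 ≤ parents.getD j 0 ∧ parents.getD j 0 < (N:Int)) :
    ∀ x, pvPf parents x < N := by
  intro x
  by_cases hx : x < N
  · have h := hrange x hx
    unfold pvPf
    omega
  · unfold pvPf
    rw [List.getD_eq_default _ _ (by omega)]
    simpa using hN

lemma pvPf_set (parents : List Int) (N : Nat) (hlen : parents.length = N) (r1 r2 : Nat)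
    (h1 : r1 < N) :
    ∀ x, pvPf (parents.set r1 ((r2:Nat):Int)) x = if x = r1 then r2 else pvPf parents x := by
  intro x
  unfold pvPf
  rw [pv_getD_set parents _ _ _ (by rw [hlen]; exact h1)]
  split_ifs with h
  · simp
  · rfl

lemma pvReach_mono {f : Nat → Nat} {j r k k' : Nat} (h : pvReach f j r k) (hk : k ≤ k') :
    pvReach f j r k' := by
  obtain ⟨h1, h2⟩ := h
  refine ⟨?_, h2⟩
  have he : k' = (k' - k) + k := by omega
  rw [he, Function.iterate_add_apply, h1, Function.iterate_fixed h2]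

lemma pvReach_fix {f : Nat → Nat} {j r k : Nat} (hfix : f j = j) (h : pvReach f j r k) :
    r = j := by
  have hi := Function.iterate_fixed hfix k
  rw [← h.1, hi]

lemma pvReach_shift {f : Nat → Nat} {x r k m : Nat} (h : pvReach f x r (k + 1)) (hm : 1 ≤ m) :
    pvReach f (f^[m] x) r k := by
  refine ⟨?_, h.2⟩
  have h' := pvReach_mono h (show k + 1 ≤ k + m by omega)
  have he : f^[k + m] x = f^[k] (f^[m] x) := Function.iterate_add_apply f k m x
  rw [← he, h'.1]

lemma pvReach_sim {f g : Nat → Nat} (hfg : ∀ x, ∃ m, 1 ≤ m ∧ g x = f^[m] x) :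
    ∀ (k x r : Nat), pvReach f x r k → pvReach g x r k := by
  intro k
  induction k with
  | zero =>
    intro x r h
    have hx : x = r := h.1
    obtain ⟨m, _, hg⟩ := hfg r
    have hgr : g r = r := by rw [hg, Function.iterate_fixed h.2]
    exact ⟨by simp [hx], hgr⟩
  | succ k ih =>
    intro x r h
    obtain ⟨m, hm, hg⟩ := hfg x
    have hfx : pvReach f (f^[m] x) r k := pvReach_shift h hm
    have hgk := ih _ _ hfx
    obtain ⟨m', _, hg'⟩ := hfg r
    have hgr : g r = r := by rw [hg', Function.iterate_fixed h.2]
    refine ⟨?_, hgr⟩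
    rw [Function.iterate_succ_apply, hg]
    exact hgk.1

lemma pvReach_union {g g' : Nat → Nat} {r1 r2 : Nat} (hne : r1 ≠ r2)
    (hr1 : g r1 = r1) (hr2 : g r2 = r2)
    (hg' : ∀ x, g' x = if x = r1 then r2 else g x) :
    ∀ (k x r : Nat), pvReach g x r k → pvReach g' x (if r = r1 then r2 else r) (k + 1) := by
  have hfix : ∀ r, g r = r → g' (if r = r1 then r2 else r) = (if r = r1 then r2 else r) := by
    intro r hr
    by_cases h : r = r1
    · rw [if_pos h, hg' r2, if_neg (fun hh => hne hh.symm), hr2]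
    · rw [if_neg h, hg' r, if_neg h, hr]
  intro k
  induction k with
  | zero =>
    intro x r h
    have hx : x = r := h.1
    subst hx
    refine ⟨?_, hfix _ h.2⟩
    rw [Function.iterate_one, hg']
    by_cases hh : x = r1
    · rw [if_pos hh, if_pos hh]
    · rw [if_neg hh, if_neg hh, h.2]
  | succ k ih =>
    intro x r h
    by_cases hx : x = r
    · subst hx
      refine ⟨?_, hfix _ h.2⟩
      have h1 : g' x = (if x = r1 then r2 else x) := by
        rw [hg']
        by_cases hh : x = r1
        · rw [if_pos hh, if_pos hh]
        · rw [if_neg hh, if_neg hh, h.2]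
      rw [Function.iterate_succ_apply, h1, Function.iterate_fixed (hfix _ h.2)]
    · have hxr1 : x ≠ r1 := by
        intro hh
        subst hh
        exact hx (by rw [← h.1, Function.iterate_fixed hr1])
      have hstep : pvReach g (g x) r k :=
        ⟨by rw [← Function.iterate_succ_apply]; exact h.1, h.2⟩
      have hk := ih _ _ hstep
      refine ⟨?_, hk.2⟩
      rw [Function.iterate_succ_apply, hg', if_neg hxr1]
      exact hk.1

lemma pvFindRoot_eq (parents : List Int) (N : Nat) (hN : 0 < N) (hlen : parents.length = N)
    (hrange : ∀ j, j < N → 0 ≤ parents.getD j 0 ∧ parents.getD j 0 < (N:Int)) :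
    ∀ (fuel k : Nat) (a : Int) (r : Nat), -(N:Int) ≤ a → a < (N:Int) →
      pvReach (pvPf parents) (pvNrm N a) r k → k + 1 ≤ fuel →
      pvFindRoot parents fuel a = ((r:Nat):Int) := by
  intro fuel
  induction fuel with
  | zero => intro k a r _ _ _ hk; omega
  | succ fu ih =>
    intro k a r ha1 ha2 hre hk
    have hxN : pvNrm N a < N := pvNrm_lt N a ha1 ha2 hN
    have hget : PySem.List.pyGet? parents a = some (parents.getD (pvNrm N a) 0) := by
      exact pv_get?_nrm parents N hlen a ha1 ha2
    have hv := hrange _ hxN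
    simp only [pvFindRoot, hget]
    by_cases hva : parents.getD (pvNrm N a) 0 = a
    · rw [if_neg (by simpa using hva)]
      have ha0 : 0 ≤ a := by rw [← hva]; exact hv.1
      have hxa : pvNrm N a = a.toNat := by unfold pvNrm; rw [if_neg (by omega)]
      have hfix : pvPf parents (pvNrm N a) = pvNrm N a := by
        unfold pvPf; rw [hva, hxa]
      have hr := pvReach_fix hfix hre
      rw [hr, hxa]
      omega
    · rw [if_pos (by simpa using hva)]
      have hvcast : parents.getD (pvNrm N a) 0 = ((pvPf parents (pvNrm N a) : Nat) : Int) := by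
        unfold pvPf; rw [Int.toNat_of_nonneg hv.1]
      rw [hvcast]
      have hyN : pvPf parents (pvNrm N a) < N := by unfold pvPf; omega
      match k, hre with
      | 0, hre =>
        have hxr : pvNrm N a = r := by simpa using hre.1
        have hyr : pvPf parents (pvNrm N a) = r := by rw [hxr]; exact hre.2
        match fu with
        | 0 => simp [pvFindRoot, hyr]
        | fu' + 1 =>
          apply ih 0 _ r (by omega) (by exact_mod_cast hyN) ?_ (by omega)
          rw [pvNrm_natCast]
          exact ⟨by simpa using hyr, hre.2⟩
      | k' + 1, hre =>
        apply ih k' _ r (by omega) (by exact_mod_cast hyN) ?_ (by omega)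
        rw [pvNrm_natCast]
        have hs := pvReach_shift (m := 1) hre (by omega)
        simpa using hs

lemma pvCompress_good (N : Nat) (hN : 0 < N) (f : Nat → Nat) (_hfr : ∀ x, f x < N) :
    ∀ (fuel k : Nat) (a : Int) (r : Nat) (parents : List Int),
      parents.length = N →
      (∀ j, j < N → 0 ≤ parents.getD j 0 ∧ parents.getD j 0 < (N:Int)) →
      (∀ x, ∃ m, 1 ≤ m ∧ pvPf parents x = f^[m] x) →
      -(N:Int) ≤ a → a < (N:Int) → r < N →
      pvReach f (pvNrm N a) r k → k + 3 ≤ fuel →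
      (pvCompress parents fuel a ((r:Nat):Int)).length = N ∧
      (∀ j, j < N → 0 ≤ (pvCompress parents fuel a ((r:Nat):Int)).getD j 0 ∧
        (pvCompress parents fuel a ((r:Nat):Int)).getD j 0 < (N:Int)) ∧
      (∀ x, ∃ m, 1 ≤ m ∧ pvPf (pvCompress parents fuel a ((r:Nat):Int)) x = f^[m] x) := by
  intro fuel
  induction fuel with
  | zero => intro k a r parents _ _ _ _ _ _ _ hk; omega
  | succ fu ih =>
    intro k a r parents hlen hrange hm ha1 ha2 hrN hre hk
    have hxN : pvNrm N a < N := pvNrm_lt N a ha1 ha2 hN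
    have hget : PySem.List.pyGet? parents a = some (parents.getD (pvNrm N a) 0) :=
      pv_get?_nrm parents N hlen a ha1 ha2
    have hv := hrange _ hxN
    simp only [pvCompress, hget]
    by_cases hva : parents.getD (pvNrm N a) 0 = a
    · rw [if_neg (by simpa using hva)]
      exact ⟨hlen, hrange, hm⟩
    · rw [if_pos (by simpa using hva)]
      have hset : PySem.List.pySetD parents a ((r:Nat):Int)
          = parents.set (pvNrm N a) ((r:Nat):Int) :=
        pv_setD_nrm parents N hlen a _ ha1 ha2
      rw [hset]
      have hlen' : (parents.set (pvNrm N a) ((r:Nat):Int)).length = N := by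
        rw [List.length_set]; exact hlen
      have hxlen : pvNrm N a < parents.length := by omega
      have hrange' : ∀ j, j < N →
          0 ≤ (parents.set (pvNrm N a) ((r:Nat):Int)).getD j 0 ∧
          (parents.set (pvNrm N a) ((r:Nat):Int)).getD j 0 < (N:Int) := by
        intro j hj
        rw [pv_getD_set parents _ _ _ hxlen]
        split_ifs with h
        · constructor
          · exact Int.natCast_nonneg r
          · exact_mod_cast hrN
        · exact hrange j hj
      obtain ⟨m0, hm0, hgx⟩ := hm (pvNrm N a)
      have hm' : ∀ x, ∃ m, 1 ≤ m ∧
          pvPf (parents.set (pvNrm N a) ((r:Nat):Int)) x = f^[m] x := by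
        intro x
        by_cases hx : x = pvNrm N a
        · subst hx
          refine ⟨max k 1, by omega, ?_⟩
          have hval : pvPf (parents.set (pvNrm N a) ((r:Nat):Int)) (pvNrm N a) = r := by
            unfold pvPf
            rw [pv_getD_set parents _ _ _ hxlen, if_pos rfl]
            simp
          rw [hval]
          rcases Nat.eq_zero_or_pos k with hk0 | hk1
          · subst hk0
            have hxr : pvNrm N a = r := by simpa using hre.1
            simp [hxr, hre.2]
          · rw [show max k 1 = k by omega]
            exact hre.1.symm
        · obtain ⟨m, hma, hmb⟩ := hm x
          refine ⟨m, hma, ?_⟩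
          rw [← hmb]
          unfold pvPf
          rw [pv_getD_set parents _ _ _ hxlen, if_neg hx]
      have hycast : parents.getD (pvNrm N a) 0
          = ((pvPf parents (pvNrm N a) : Nat) : Int) := by
        unfold pvPf; rw [Int.toNat_of_nonneg hv.1]
      rw [hycast]
      have hyN : pvPf parents (pvNrm N a) < N := by unfold pvPf; omega
      rcases Nat.eq_zero_or_pos k with hk0 | hk1
      · subst hk0
        have hxr : pvNrm N a = r := by simpa using hre.1
        have hyr : pvPf parents (pvNrm N a) = r := by
          rw [hgx, hxr, Function.iterate_fixed hre.2]
        rw [hyr]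
        obtain ⟨fu', rfl⟩ : ∃ fu', fu = fu' + 1 := ⟨fu - 1, by omega⟩
        have hget' : PySem.List.pyGet? (parents.set (pvNrm N a) ((r:Nat):Int)) ((r:Nat):Int)
            = some ((parents.set (pvNrm N a) ((r:Nat):Int)).getD (pvNrm N ((r:Nat):Int)) 0) :=
          pv_get?_nrm _ N hlen' _ (by omega) (by exact_mod_cast hrN)
        have hvr : (parents.set (pvNrm N a) ((r:Nat):Int)).getD r 0 = ((r:Nat):Int) := by
          rw [pv_getD_set parents _ _ _ hxlen, if_pos hxr.symm]
        rw [pvNrm_natCast] at hget'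
        simp only [pvCompress, hget', hvr]
        rw [if_neg (by simp)]
        exact ⟨hlen', hrange', hm'⟩
      · have hre' : pvReach f (pvNrm N a) r ((k - 1) + 1) := by
          rw [show (k - 1) + 1 = k by omega]
          exact hre
        have hrey : pvReach f (pvNrm N ((pvPf parents (pvNrm N a) : Nat) : Int)) r (k - 1) := by
          rw [pvNrm_natCast]
          have hs := pvReach_shift hre' hm0
          rw [← hgx] at hs
          exact hs
        exact ih (k - 1) _ r _ hlen' hrange' hm' (by omega) (by exact_mod_cast hyN) hrN hrey
          (by omega)

lemma pvLoop_eq (N : Nat) (hN : 0 < N) (T : Nat) :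
    ∀ (rest : List (Int × Int)) (i : Int) (parents size labels : List Int) (cnt : Int)
      (t : Nat) (rm : Nat → Nat),
      parents.length = N → labels.length = N →
      (∀ j, j < N → 0 ≤ parents.getD j 0 ∧ parents.getD j 0 < (N:Int)) →
      (∀ j, j < N → rm j < N) →
      (∀ j, j < N → pvReach (pvPf parents) j (rm j) t) →
      (∀ u v, u < N → v < N → (rm u = rm v ↔ labels.getD u 0 = labels.getD v 0)) →
      (∀ p ∈ rest, -(N:Int) ≤ p.1 ∧ p.1 < (N:Int) ∧ -(N:Int) ≤ p.2 ∧ p.2 < (N:Int)) →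
      t + rest.length ≤ T →
      pvLoopA rest i parents size (N + T + 2) cnt = pvLoopB rest i labels cnt := by
  intro rest
  induction rest with
  | nil => intros; rfl
  | cons hd rest ih =>
    obtain ⟨i1, i2⟩ := hd
    intro i parents size labels cnt t rm hlenP hlenL hrange hrml hreach hiff hbnd hbud
    have hbud' : t + rest.length + 1 ≤ T := by simpa using hbud
    obtain ⟨hb1, hb2, hb3, hb4⟩ := hbnd (i1, i2) List.mem_cons_self
    have hx1 : pvNrm N i1 < N := pvNrm_lt N i1 hb1 hb2 hN
    have hx2 : pvNrm N i2 < N := pvNrm_lt N i2 hb3 hb4 hN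
    have hfr : ∀ x, pvPf parents x < N := pvPf_lt parents N hN hlenP hrange
    have hr1 : pvFindRoot parents (N + T + 2) i1 = ((rm (pvNrm N i1) : Nat) : Int) :=
      pvFindRoot_eq parents N hN hlenP hrange (N + T + 2) t i1 _ hb1 hb2 (hreach _ hx1)
        (by omega)
    obtain ⟨hlen1, hrange1, hm1⟩ :=
      pvCompress_good N hN (pvPf parents) hfr (N + T + 2) t i1 (rm (pvNrm N i1)) parents
        hlenP hrange (fun x => ⟨1, le_refl 1, by simp⟩) hb1 hb2 (hrml _ hx1) (hreach _ hx1)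
        (by omega)
    have hreach1 : ∀ j, j < N →
        pvReach (pvPf (pvCompress parents (N + T + 2) i1 ((rm (pvNrm N i1) : Nat) : Int))) j
          (rm j) t :=
      fun j hj => pvReach_sim hm1 t j (rm j) (hreach j hj)
    have hfr1 : ∀ x,
        pvPf (pvCompress parents (N + T + 2) i1 ((rm (pvNrm N i1) : Nat) : Int)) x < N :=
      pvPf_lt _ N hN hlen1 hrange1
    have hr2 : pvFindRoot (pvCompress parents (N + T + 2) i1 ((rm (pvNrm N i1) : Nat) : Int))
          (N + T + 2) i2 = ((rm (pvNrm N i2) : Nat) : Int) :=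
      pvFindRoot_eq _ N hN hlen1 hrange1 (N + T + 2) t i2 _ hb3 hb4 (hreach1 _ hx2)
        (by omega)
    obtain ⟨hlen2, hrange2, hm2⟩ :=
      pvCompress_good N hN
        (pvPf (pvCompress parents (N + T + 2) i1 ((rm (pvNrm N i1) : Nat) : Int))) hfr1
        (N + T + 2) t i2 (rm (pvNrm N i2)) _ hlen1 hrange1
        (fun x => ⟨1, le_refl 1, by simp⟩) hb3 hb4 (hrml _ hx2) (hreach1 _ hx2) (by omega)
    have hreach2 : ∀ j, j < N →
        pvReach (pvPf (pvCompress
            (pvCompress parents (N + T + 2) i1 ((rm (pvNrm N i1) : Nat) : Int))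
            (N + T + 2) i2 ((rm (pvNrm N i2) : Nat) : Int))) j (rm j) t :=
      fun j hj => pvReach_sim hm2 t j (rm j) (hreach1 j hj)
    have hla : PySem.List.pyGetD labels i1 0 = labels.getD (pvNrm N i1) 0 :=
      pv_getD_nrm labels N hlenL i1 hb1 hb2
    have hlb : PySem.List.pyGetD labels i2 0 = labels.getD (pvNrm N i2) 0 :=
      pv_getD_nrm labels N hlenL i2 hb3 hb4
    simp only [pvLoopA, pvLoopB, hr1, hr2, hla, hlb]
    set parents2 := pvCompress
        (pvCompress parents (N + T + 2) i1 ((rm (pvNrm N i1) : Nat) : Int))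
        (N + T + 2) i2 ((rm (pvNrm N i2) : Nat) : Int) with hp2
    by_cases hcond : rm (pvNrm N i1) = rm (pvNrm N i2)
    · have hcA : ¬ (((rm (pvNrm N i1) : Nat) : Int) ≠ ((rm (pvNrm N i2) : Nat) : Int)) := by
        simp [hcond]
      have hcB : ¬ (labels.getD (pvNrm N i1) 0 ≠ labels.getD (pvNrm N i2) 0) := by
        intro hne
        exact hne ((hiff _ _ hx1 hx2).mp hcond)
      rw [if_neg hcA, if_neg hcB]
      dsimp only
      by_cases hcnt : cnt = 1
      · rw [if_pos hcnt, if_pos hcnt]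
      · rw [if_neg hcnt, if_neg hcnt]
        exact ih (i + 1) parents2 size labels cnt t rm hlen2 hlenL hrange2 hrml hreach2 hiff
          (fun p hp => hbnd p (List.mem_cons_of_mem _ hp)) (by omega)
    · have hcA : (((rm (pvNrm N i1) : Nat) : Int) ≠ ((rm (pvNrm N i2) : Nat) : Int)) := by
        simpa using hcond
      have hlab : labels.getD (pvNrm N i1) 0 ≠ labels.getD (pvNrm N i2) 0 :=
        fun h => hcond ((hiff _ _ hx1 hx2).mpr h)
      rw [if_pos hcA, if_pos hlab, ite_self]
      dsimp only
      have hsetA : PySem.List.pySetD parents2 ((rm (pvNrm N i1) : Nat) : Int)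
            ((rm (pvNrm N i2) : Nat) : Int)
          = parents2.set (rm (pvNrm N i1)) ((rm (pvNrm N i2) : Nat) : Int) := by
        rw [pv_setD_nrm parents2 N hlen2 _ _ (by omega)
          (by exact_mod_cast hrml _ hx1), pvNrm_natCast]
      rw [hsetA]
      have hlen3 : (parents2.set (rm (pvNrm N i1)) ((rm (pvNrm N i2) : Nat) : Int)).length = N := by
        rw [List.length_set]; exact hlen2
      have hg' : ∀ x, pvPf (parents2.set (rm (pvNrm N i1)) ((rm (pvNrm N i2) : Nat) : Int)) x
          = if x = rm (pvNrm N i1) then rm (pvNrm N i2) else pvPf parents2 x :=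
        pvPf_set parents2 N hlen2 _ _ (hrml _ hx1)
      have hrange3 : ∀ j, j < N →
          0 ≤ (parents2.set (rm (pvNrm N i1)) ((rm (pvNrm N i2) : Nat) : Int)).getD j 0 ∧
          (parents2.set (rm (pvNrm N i1)) ((rm (pvNrm N i2) : Nat) : Int)).getD j 0 < (N:Int) := by
        intro j hj
        rw [pv_getD_set parents2 _ _ _ (by rw [hlen2]; exact hrml _ hx1)]
        split_ifs with h
        · exact ⟨Int.natCast_nonneg _, by exact_mod_cast hrml _ hx2⟩
        · exact hrange2 j hj
      have hreach3 : ∀ j, j < N →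
          pvReach (pvPf (parents2.set (rm (pvNrm N i1)) ((rm (pvNrm N i2) : Nat) : Int))) j
            (if rm j = rm (pvNrm N i1) then rm (pvNrm N i2) else rm j) (t + 1) :=
        fun j hj => pvReach_union hcond (hreach2 _ hx1).2 (hreach2 _ hx2).2 hg' t j (rm j)
          (hreach2 j hj)
      have hlenL' : (labels.map (fun l =>
          if l = labels.getD (pvNrm N i1) 0 then labels.getD (pvNrm N i2) 0 else l)).length = N := by
        rw [List.length_map]; exact hlenL
      have hlg : ∀ u, u < N →
          (labels.map (fun l =>
            if l = labels.getD (pvNrm N i1) 0 then labels.getD (pvNrm N i2) 0 else l)).getD u 0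
          = (if labels.getD u 0 = labels.getD (pvNrm N i1) 0 then labels.getD (pvNrm N i2) 0
             else labels.getD u 0) := by
        intro u hu
        rw [pv_getD_map _ _ _ (by rw [hlenL]; exact hu)]
      have hiff' : ∀ u v, u < N → v < N →
          ((if rm u = rm (pvNrm N i1) then rm (pvNrm N i2) else rm u)
            = (if rm v = rm (pvNrm N i1) then rm (pvNrm N i2) else rm v) ↔
           (labels.map (fun l =>
             if l = labels.getD (pvNrm N i1) 0 then labels.getD (pvNrm N i2) 0 else l)).getD u 0
            = (labels.map (fun l =>
             if l = labels.getD (pvNrm N i1) 0 then labels.getD (pvNrm N i2) 0 else l)).getD v 0) := by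
        intro u v hu hv
        rw [hlg u hu, hlg v hv]
        have hub : rm u = rm (pvNrm N i1) ↔ labels.getD u 0 = labels.getD (pvNrm N i1) 0 :=
          hiff u _ hu hx1
        have hvb : rm v = rm (pvNrm N i1) ↔ labels.getD v 0 = labels.getD (pvNrm N i1) 0 :=
          hiff v _ hv hx1
        have hub2 : rm u = rm (pvNrm N i2) ↔ labels.getD u 0 = labels.getD (pvNrm N i2) 0 :=
          hiff u _ hu hx2
        have hvb2 : rm v = rm (pvNrm N i2) ↔ labels.getD v 0 = labels.getD (pvNrm N i2) 0 :=
          hiff v _ hv hx2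
        have huv : rm u = rm v ↔ labels.getD u 0 = labels.getD v 0 := hiff u v hu hv
        by_cases h1 : rm u = rm (pvNrm N i1) <;> by_cases h2 : rm v = rm (pvNrm N i1)
        · rw [if_pos h1, if_pos h2, if_pos (hub.mp h1), if_pos (hvb.mp h2)]
          exact iff_of_true rfl rfl
        · rw [if_pos h1, if_neg h2, if_pos (hub.mp h1), if_neg (fun hh => h2 (hvb.mpr hh))]
          constructor
          · intro hh; exact (hvb2.mp hh.symm).symm
          · intro hh; exact (hvb2.mpr hh.symm).symm
        · rw [if_neg h1, if_pos h2, if_neg (fun hh => h1 (hub.mpr hh)), if_pos (hvb.mp h2)]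
          exact hub2
        · rw [if_neg h1, if_neg h2, if_neg (fun hh => h1 (hub.mpr hh)),
            if_neg (fun hh => h2 (hvb.mpr hh))]
          exact huv
      have hrml' : ∀ j, j < N →
          (if rm j = rm (pvNrm N i1) then rm (pvNrm N i2) else rm j) < N := by
        intro j hj
        split_ifs
        · exact hrml _ hx2
        · exact hrml j hj
      by_cases hcnt : cnt - 1 = 1
      · rw [if_pos hcnt, if_pos hcnt]
      · rw [if_neg hcnt, if_neg hcnt]
        exact ih (i + 1) _ _ _ (cnt - 1) (t + 1)
          (fun j => if rm j = rm (pvNrm N i1) then rm (pvNrm N i2) else rm j)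
          hlen3 hlenL' hrange3 hrml' hreach3 hiff'
          (fun p hp => hbnd p (List.mem_cons_of_mem _ hp)) (by omega)

-- ===== VERDICT (by name: the statement is the Claim_ definition above) =====
theorem process_bridges_spec : Claim_equal_process_bridges := by
  unfold Claim_equal_process_bridges
  intro bridges n _hdom hpre
  unfold Spec_process_bridges
  unfold Pre_process_bridges at hpre
  rcases hpre with hemp | ⟨hn, hb⟩
  · subst hemp; rfl
  · unfold process_bridges process_bridges_alt
    have hN : 0 < n.toNat := by omega
    have hNn : ((n.toNat : Nat) : Int) = n := Int.toNat_of_nonneg (by omega)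
    have hlen : (PySem.List.pyRange 0 n 1).length = n.toNat := by
      rw [PySem.List.length_pyRange_one]; simp
    have hinit : ∀ j, j < n.toNat → (PySem.List.pyRange 0 n 1).getD j 0 = ((j:Nat) : Int) := by
      intro j hj
      have hjl : j < (PySem.List.pyRange 0 n 1).length := by rw [hlen]; exact hj
      rw [List.getD_eq_getElem _ _ hjl, PySem.List.getElem_pyRange_one]
      simp
    exact pvLoop_eq n.toNat hN bridges.length bridges 1
      (PySem.List.pyRange 0 n 1) ((PySem.List.pyRange 0 n 1).map (fun _ => 1))
      (PySem.List.pyRange 0 n 1) n 0 (fun j => j)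
      hlen hlen
      (fun j hj => by rw [hinit j hj]; constructor <;> omega)
      (fun j hj => hj)
      (fun j hj => ⟨by simp, by unfold pvPf; rw [hinit j hj]; simp⟩)
      (fun u v hu hv => by
        rw [hinit u hu, hinit v hv]
        constructor
        · intro h
          exact_mod_cast (show u = v from h)
        · intro h
          show u = v
          exact_mod_cast h)
      (fun p hp => by
        have h := hb p hp
        rw [hNn]
        exact ⟨h.1, h.2.1, h.2.2.1, h.2.2.2⟩)
      (by omega)
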